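-- pv_equiv track=rewrite | github.com/davidb2/fixation-location | src/figure_5_periodic_grid/colonization.py | build_square_torus_neighbors
-- ===== SOURCE A (Python) =====
-- def build_square_torus_neighbors(n):
--   n = int(n)
--   neighbors = []
--   for row in range(n):
--     for col in range(n):
--       up = ((row - 1) % n) * n + col
--       down = ((row + 1) % n) * n + col
--       left = row * n + ((col - 1) % n)
--       right = row * n + ((col + 1) % n)
--       neighbors.append((up, down, left, right))
--   return tuple(neighbors)
-- ===== SOURCE B (Python) =====
-- def build_square_torus_neighbors(n):
--   n = int(n)
--   if n <= 0:
--     return ()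
--   idx = list(range(n * n))
--   # whole-grid rotations of the flat index list give every cell's up/down neighbor at once
--   up = idx[-n:] + idx[:-n]
--   down = idx[n:] + idx[:n]
--   # per-row rotations give the left/right neighbors
--   rows = [idx[r * n:(r + 1) * n] for r in range(n)]
--   left = [x for row in rows for x in row[-1:] + row[:-1]]
--   right = [x for row in rows for x in row[1:] + row[:1]]
--   return tuple(zip(up, down, left, right))
-- ===== Notes on version B (the rewrite author's own statement) =====
-- stated objective: alternative
-- what changed: B has no per-cell modular arithmetic at all: it materializes the flat index list once and obtains all up/down neighbors as two whole-list rotations by n (slicing), all left/right neighbors as per-row single-step rotations, and zips the four lists into the result.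
import Mathlib
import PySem

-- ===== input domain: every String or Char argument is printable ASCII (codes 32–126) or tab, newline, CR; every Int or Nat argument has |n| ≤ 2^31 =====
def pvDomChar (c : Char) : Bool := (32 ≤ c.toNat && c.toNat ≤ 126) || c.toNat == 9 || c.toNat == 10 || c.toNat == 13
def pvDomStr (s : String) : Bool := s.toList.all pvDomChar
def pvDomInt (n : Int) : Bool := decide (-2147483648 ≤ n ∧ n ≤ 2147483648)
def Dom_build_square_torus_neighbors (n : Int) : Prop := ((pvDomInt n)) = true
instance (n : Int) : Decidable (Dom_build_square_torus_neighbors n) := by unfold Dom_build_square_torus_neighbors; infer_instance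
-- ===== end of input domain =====

-- ===== PORT A =====
def build_square_torus_neighbors (n : Int) : List (Int × Int × Int × Int) :=
  (PySem.List.pyRange 0 n 1).foldl (fun acc row =>
    (PySem.List.pyRange 0 n 1).foldl (fun acc2 col =>
      acc2 ++ [((PySem.Int.mod (row - 1) n) * n + col,
                (PySem.Int.mod (row + 1) n) * n + col,
                row * n + PySem.Int.mod (col - 1) n,
                row * n + PySem.Int.mod (col + 1) n)]) acc) []

-- ===== PORT B =====
-- B: no per-cell modular arithmetic — the flat index list is rotated whole (up/down) and
-- per row (left/right) by slicing, and the four lists are zipped (Python's 4-ary zip).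
def pvZip4 {α β γ δ : Type} : List α → List β → List γ → List δ → List (α × β × γ × δ)
  | a :: as, b :: bs, c :: cs, d :: ds => (a, b, c, d) :: pvZip4 as bs cs ds
  | _, _, _, _ => []

def build_square_torus_neighbors_alt (n : Int) : List (Int × Int × Int × Int) :=
  if n ≤ 0 then [] else
  let idx := PySem.List.pyRange 0 (n * n) 1
  let up := PySem.List.slice idx (some (-n)) none ++ PySem.List.slice idx none (some (-n))
  let down := PySem.List.slice idx (some n) none ++ PySem.List.slice idx none (some n)
  let rows := (PySem.List.pyRange 0 n 1).map (fun r =>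
    PySem.List.slice idx (some (r * n)) (some ((r + 1) * n)))
  let left := rows.flatMap (fun row =>
    PySem.List.slice row (some (-1)) none ++ PySem.List.slice row none (some (-1)))
  let right := rows.flatMap (fun row =>
    PySem.List.slice row (some 1) none ++ PySem.List.slice row none (some 1))
  pvZip4 up down left right

-- ===== PRECONDITION & SPEC =====
def Spec_build_square_torus_neighbors (n : Int) (out : List (Int × Int × Int × Int)) : Prop :=
  out = build_square_torus_neighbors_alt n
instance (n : Int) (out : List (Int × Int × Int × Int)) : Decidable (Spec_build_square_torus_neighbors n out) := by
  unfold Spec_build_square_torus_neighbors; infer_instance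

-- ===== CLAIM =====
def Claim_equal_build_square_torus_neighbors : Prop :=
  ∀ (n : Int), Dom_build_square_torus_neighbors n →
    Spec_build_square_torus_neighbors n (build_square_torus_neighbors n)

-- ===== LEMMAS AND PROOFS =====

-- Python's 4-ary zip of four maps over one list is a map of the quadruple.
theorem pvZip4_map {α β γ δ ε : Type} (l : List α) (f1 : α → β) (f2 : α → γ) (f3 : α → δ) (f4 : α → ε) :
    pvZip4 (l.map f1) (l.map f2) (l.map f3) (l.map f4) = l.map (fun x => (f1 x, f2 x, f3 x, f4 x)) := by
  induction l with
  | nil => rfl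
  | cons x xs ih => simp [pvZip4, ih]

-- flattening a uniform grid of rows into a single indexed list
theorem pvFlatMap_range_map {α : Type} (g : Nat → Nat → α) (N : Nat) (hN : 0 < N) (m : Nat) :
    (List.range m).flatMap (fun r => (List.range N).map (g r)) =
      (List.range (m * N)).map (fun i => g (i / N) (i % N)) := by
  induction m with
  | zero => simp
  | succ m ih =>
    rw [List.range_succ, List.flatMap_append, ih, Nat.succ_mul, List.range_add, List.map_append]
    congr 1
    simp only [List.flatMap_cons, List.flatMap_nil, List.append_nil, List.map_map]
    apply List.map_congr_left
    intro j hj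
    simp only [List.mem_range] at hj
    simp only [Function.comp_apply]
    have hd : (m * N + j) / N = m := by
      rw [Nat.add_comm, Nat.mul_comm, Nat.add_mul_div_left _ _ hN, Nat.div_eq_of_lt hj,
        Nat.zero_add]
    have hm : (m * N + j) % N = j := by
      rw [Nat.add_comm, Nat.mul_comm, Nat.add_mul_mod_self_left, Nat.mod_eq_of_lt hj]
    rw [hd, hm]

theorem pvDrop_pyRange (a : Int) (t : Nat) (b : Int) (h : a + t ≤ b) :
    (PySem.List.pyRange a b 1).drop t = PySem.List.pyRange (a + (t : Int)) b 1 := by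
  rw [PySem.List.pyRange_one_append a (a + (t : Int)) b (by omega) h]
  have hl : (PySem.List.pyRange a (a + (t : Int)) 1).length = t := by
    rw [PySem.List.length_pyRange_one]; omega
  rw [List.drop_left' hl]

theorem pvTake_pyRange (a : Int) (t : Nat) (b : Int) (h : a + t ≤ b) :
    (PySem.List.pyRange a b 1).take t = PySem.List.pyRange a (a + (t : Int)) 1 := by
  rw [PySem.List.pyRange_one_append a (a + (t : Int)) b (by omega) h]
  have hl : (PySem.List.pyRange a (a + (t : Int)) 1).length = t := by
    rw [PySem.List.length_pyRange_one]; omega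
  rw [List.take_left' hl]

-- the per-cell values of the four rotated lists
def pvUF (N i : Nat) : Int := if i < N then ((N * N - N + i : Nat) : Int) else ((i - N : Nat) : Int)
def pvDF (N i : Nat) : Int := if i < N * N - N then ((N + i : Nat) : Int) else ((i - (N * N - N) : Nat) : Int)
def pvGL (N r c : Nat) : Int := if c = 0 then ((r * N + N - 1 : Nat) : Int) else ((r * N + c - 1 : Nat) : Int)
def pvGR (N r c : Nat) : Int := if c = N - 1 then ((r * N : Nat) : Int) else ((r * N + c + 1 : Nat) : Int)

-- rotating range(S+D) right by S, as two concatenated ranges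
theorem pvRot_eq (S D : Nat) :
    PySem.List.pyRange (D : Int) ((S + D : Nat) : Int) 1 ++ PySem.List.pyRange 0 (D : Int) 1 =
    (List.range (S + D)).map (fun i => if i < S then ((D + i : Nat) : Int) else ((i - S : Nat) : Int)) := by
  rw [List.range_add, List.map_append, List.map_map]
  congr 1
  · rw [PySem.List.pyRange_one]
    have ht : (((S + D : Nat) : Int) - (D : Int)).toNat = S := by push_cast; omega
    rw [ht]
    apply List.map_congr_left
    intro k hk
    simp only [List.mem_range] at hk
    rw [if_pos hk]
    push_cast; ring
  · rw [PySem.List.pyRange_zero_nat]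
    apply List.map_congr_left
    intro k _
    simp only [Function.comp_apply]
    rw [if_neg (by omega)]
    congr 1
    omega

theorem pvUp_eq (N : Nat) (hN : 0 < N) :
    PySem.List.pyRange ((N * N - N : Nat) : Int) ((N * N : Nat) : Int) 1 ++
      PySem.List.pyRange 0 ((N * N - N : Nat) : Int) 1 =
    (List.range (N * N)).map (pvUF N) := by
  have hNM : N ≤ N * N := by
    calc N = 1 * N := (one_mul N).symm
    _ ≤ N * N := Nat.mul_le_mul_right N hN
  have h1 : N + (N * N - N) = N * N := by omega
  have := pvRot_eq N (N * N - N)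
  rw [h1] at this
  rw [this]
  rfl

theorem pvDown_eq (N : Nat) (hN : 0 < N) :
    PySem.List.pyRange ((N : Nat) : Int) ((N * N : Nat) : Int) 1 ++
      PySem.List.pyRange 0 ((N : Nat) : Int) 1 =
    (List.range (N * N)).map (pvDF N) := by
  have hNM : N ≤ N * N := by
    calc N = 1 * N := (one_mul N).symm
    _ ≤ N * N := Nat.mul_le_mul_right N hN
  have h1 : (N * N - N) + N = N * N := by omega
  have := pvRot_eq (N * N - N) N
  rw [h1] at this
  rw [this]
  rfl

-- one row of the grid, as produced by the slice in B
theorem pvRow_eq (N k : Nat) (hk : k < N) :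
    PySem.List.slice (PySem.List.pyRange 0 ((N * N : Nat) : Int) 1)
      (some ((k : Int) * (N : Int))) (some (((k : Int) + 1) * (N : Int))) =
    PySem.List.pyRange ((k * N : Nat) : Int) ((k * N + N : Nat) : Int) 1 := by
  have hkN : k * N + N ≤ N * N := by
    calc k * N + N = (k + 1) * N := by ring
    _ ≤ N * N := Nat.mul_le_mul_right N hk
  rw [show ((k : Int) * (N : Int)) = ((k * N : Nat) : Int) by push_cast; ring,
      show (((k : Int) + 1) * (N : Int)) = ((k * N + N : Nat) : Int) by push_cast; ring,
      PySem.List.slice_natCast]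
  rw [show k * N + N - k * N = N by omega]
  rw [pvDrop_pyRange 0 (k * N) ((N * N : Nat) : Int) (by push_cast; omega), zero_add]
  rw [pvTake_pyRange ((k * N : Nat) : Int) N ((N * N : Nat) : Int) (by push_cast; omega)]
  norm_cast

theorem pvRotL_eq (N k : Nat) (hN : 0 < N) :
    (PySem.List.slice (PySem.List.pyRange ((k * N : Nat) : Int) ((k * N + N : Nat) : Int) 1) (some (-1)) none ++
     PySem.List.slice (PySem.List.pyRange ((k * N : Nat) : Int) ((k * N + N : Nat) : Int) 1) none (some (-1))) =
    (List.range N).map (pvGL N k) := by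
  obtain ⟨P, rfl⟩ : ∃ P, N = P + 1 := ⟨N - 1, by omega⟩
  have hlen : (PySem.List.pyRange ((k * (P + 1) : Nat) : Int) ((k * (P + 1) + (P + 1) : Nat) : Int) 1).length = P + 1 := by
    rw [PySem.List.length_pyRange_one]; push_cast; omega
  rw [PySem.List.slice_from_neg_one, PySem.List.slice_to_neg_one, List.dropLast_eq_take, hlen]
  rw [pvDrop_pyRange _ (P + 1 - 1) _ (by push_cast; omega)]
  rw [pvTake_pyRange _ (P + 1 - 1) _ (by push_cast; omega)]
  rw [show (P + 1 - 1 : Nat) = P from rfl]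
  rw [show ((k * (P + 1) + (P + 1) : Nat) : Int) = (((k * (P + 1) : Nat) : Int) + (P : Int)) + 1 by push_cast; ring]
  rw [PySem.List.pyRange_one_singleton]
  rw [List.range_succ_eq_map, List.map_cons, List.map_map, List.singleton_append]
  congr 1
  rw [PySem.List.pyRange_one]
  have ht : ((((k * (P + 1) : Nat) : Int) + (P : Int)) - ((k * (P + 1) : Nat) : Int)).toNat = P := by omega
  rw [ht]
  apply List.map_congr_left
  intro c _
  simp only [Function.comp_apply, pvGL]
  rw [if_neg (Nat.succ_ne_zero c)]
  have he : k * (P + 1) + Nat.succ c - 1 = k * (P + 1) + c := by omega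
  rw [he]; push_cast; ring

theorem pvRotR_eq (N k : Nat) (hN : 0 < N) :
    (PySem.List.slice (PySem.List.pyRange ((k * N : Nat) : Int) ((k * N + N : Nat) : Int) 1) (some 1) none ++
     PySem.List.slice (PySem.List.pyRange ((k * N : Nat) : Int) ((k * N + N : Nat) : Int) 1) none (some 1)) =
    (List.range N).map (pvGR N k) := by
  obtain ⟨P, rfl⟩ : ∃ P, N = P + 1 := ⟨N - 1, by omega⟩
  rw [PySem.List.slice_from _ (by norm_num : (0:Int) ≤ 1), PySem.List.slice_to _ (by norm_num : (0:Int) ≤ 1)]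
  rw [show (1 : Int).toNat = 1 from rfl]
  rw [pvDrop_pyRange _ 1 _ (by push_cast; omega)]
  rw [pvTake_pyRange _ 1 _ (by push_cast; omega)]
  rw [show ((1 : Nat) : Int) = (1 : Int) from rfl]
  rw [PySem.List.pyRange_one_singleton]
  rw [List.range_succ, List.map_append, List.map_cons, List.map_nil]
  congr 1
  · rw [PySem.List.pyRange_one]
    have ht : (((k * (P + 1) + (P + 1) : Nat) : Int) - (((k * (P + 1) : Nat) : Int) + 1)).toNat = P := by push_cast; omega
    rw [ht]
    apply List.map_congr_left
    intro c hc
    simp only [List.mem_range] at hc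
    simp only [pvGR]
    rw [if_neg (by omega)]
    push_cast; ring
  · simp [pvGR]

-- A's per-cell tuple agrees with the four rotation values
theorem pvCell_eq (N r c : Nat) (hN : 0 < N) (hr : r < N) (hc : c < N) :
    ((PySem.Int.mod ((r : Int) - 1) N) * N + c,
     (PySem.Int.mod ((r : Int) + 1) N) * N + c,
     (r : Int) * N + PySem.Int.mod ((c : Int) - 1) N,
     (r : Int) * N + PySem.Int.mod ((c : Int) + 1) N) =
    (pvUF N (r * N + c), pvDF N (r * N + c), pvGL N r c, pvGR N r c) := by
  have hNpos : (0 : Int) < (N : Int) := by exact_mod_cast hN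
  have hNM : N ≤ N * N := by
    calc N = 1 * N := (one_mul N).symm
    _ ≤ N * N := Nat.mul_le_mul_right N hN
  have mod_small : ∀ a : Nat, a < N → PySem.Int.mod ((a : Nat) : Int) N = ((a : Nat) : Int) := by
    intro a ha
    rw [PySem.Int.mod_eq_emod_of_pos hNpos]
    exact Int.emod_eq_of_lt (by positivity) (by exact_mod_cast ha)
  have mod_negone : PySem.Int.mod (-1) N = (N : Int) - 1 := by
    rw [PySem.Int.mod_eq_emod_of_pos hNpos]
    have h1 : ((N : Int) - 1) % N = (N : Int) - 1 :=
      Int.emod_eq_of_lt (by omega) (by omega)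
    have h2 := Int.add_mul_emod_self_left (a := (-1 : Int)) (b := (N : Int)) (c := 1)
    rw [show ((-1 : Int) + (N : Int) * 1) = (N : Int) - 1 by ring, h1] at h2
    exact h2.symm
  have mod_self : PySem.Int.mod ((N : Nat) : Int) N = 0 := by
    rw [PySem.Int.mod_eq_emod_of_pos hNpos]; exact Int.emod_self
  simp only [Prod.mk.injEq]
  refine ⟨?_, ?_, ?_, ?_⟩
  · -- up component
    by_cases h0 : r = 0
    · subst h0
      rw [show ((0 : Nat) : Int) - 1 = (-1 : Int) by norm_num, mod_negone]
      simp only [pvUF, zero_mul, Nat.zero_add, if_pos hc]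
      rw [Nat.cast_add, Nat.cast_sub hNM]
      push_cast; ring
    · have hr1 : 1 ≤ r := Nat.one_le_iff_ne_zero.2 h0
      have hNr : N ≤ r * N := by
        calc N = 1 * N := (one_mul N).symm
        _ ≤ r * N := Nat.mul_le_mul_right N hr1
      rw [show ((r : Nat) : Int) - 1 = (((r - 1 : Nat)) : Int) by rw [Nat.cast_sub hr1]; push_cast; ring,
          mod_small (r - 1) (by omega)]
      simp only [pvUF]
      rw [if_neg (by omega)]
      rw [Nat.cast_sub (by omega : N ≤ r * N + c)]
      rw [Nat.cast_sub hr1]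
      push_cast; ring
  · -- down component
    by_cases h0 : r = N - 1
    · subst h0
      rw [show (((N - 1 : Nat)) : Int) + 1 = ((N : Nat) : Int) by rw [Nat.cast_sub hN]; push_cast; ring,
          mod_self]
      simp only [pvDF]
      have hrc : ¬ ((N - 1) * N + c < N * N - N) := by
        have : (N - 1) * N = N * N - N := by rw [Nat.sub_mul, one_mul]
        omega
      rw [if_neg hrc]
      have he : (N - 1) * N + c - (N * N - N) = c := by
        have : (N - 1) * N = N * N - N := by rw [Nat.sub_mul, one_mul]
        omega
      rw [he]
      ring
    · have hr1 : r + 1 < N := by omega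
      rw [show ((r : Nat) : Int) + 1 = (((r + 1 : Nat)) : Int) by push_cast; ring,
          mod_small (r + 1) hr1]
      simp only [pvDF]
      have hrc : r * N + c < N * N - N := by
        have h2 : (r + 1) * N ≤ (N - 1) * N := Nat.mul_le_mul_right N (by omega)
        have h3 : (N - 1) * N = N * N - N := by rw [Nat.sub_mul, one_mul]
        have h4 : r * N + c < (r + 1) * N := by
          have : (r + 1) * N = r * N + N := by ring
          omega
        omega
      rw [if_pos hrc]
      push_cast; ring
  · -- left component
    by_cases h0 : c = 0
    · subst h0
      rw [show ((0 : Nat) : Int) - 1 = (-1 : Int) by norm_num, mod_negone]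
      simp only [pvGL]
      simp only [if_true]
      rw [Nat.cast_sub (by omega : 1 ≤ r * N + N)]
      push_cast; ring
    · have hc1 : 1 ≤ c := Nat.one_le_iff_ne_zero.2 h0
      rw [show ((c : Nat) : Int) - 1 = (((c - 1 : Nat)) : Int) by rw [Nat.cast_sub hc1]; push_cast; ring,
          mod_small (c - 1) (by omega)]
      simp only [pvGL, if_neg h0]
      rw [Nat.cast_sub (by omega : 1 ≤ r * N + c)]
      rw [Nat.cast_sub hc1]
      push_cast; ring
  · -- right component
    by_cases h0 : c = N - 1
    · subst h0
      rw [show (((N - 1 : Nat)) : Int) + 1 = ((N : Nat) : Int) by rw [Nat.cast_sub hN]; push_cast; ring,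
          mod_self]
      simp only [pvGR]
      simp only [if_true]
      push_cast; ring
    · have hc1 : c + 1 < N := by omega
      rw [show ((c : Nat) : Int) + 1 = (((c + 1 : Nat)) : Int) by push_cast; ring,
          mod_small (c + 1) hc1]
      simp only [pvGR, if_neg h0]
      push_cast; ring

theorem pvA_eq (N : Nat) (hN : 0 < N) :
    build_square_torus_neighbors ((N : Nat) : Int) =
    (List.range (N * N)).map (fun i =>
      (pvUF N i, pvDF N i, pvGL N (i / N) (i % N), pvGR N (i / N) (i % N))) := by
  unfold build_square_torus_neighbors
  simp only [PySem.List.foldl_append_singleton_eq_map, PySem.List.foldl_append_eq_flatMap,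
    List.nil_append]
  rw [PySem.List.pyRange_zero_nat]
  simp only [List.flatMap_map, List.map_map, Function.comp_def]
  rw [pvFlatMap_range_map _ N hN]
  apply List.map_congr_left
  intro i hi
  simp only [List.mem_range] at hi
  have hr : i / N < N := (Nat.div_lt_iff_lt_mul hN).2 hi
  have hc : i % N < N := Nat.mod_lt _ hN
  have h := pvCell_eq N (i / N) (i % N) hN hr hc
  rw [Nat.div_add_mod' i N] at h
  exact h

theorem pvB_eq (N : Nat) (hN : 0 < N) :
    build_square_torus_neighbors_alt ((N : Nat) : Int) =
    (List.range (N * N)).map (fun i =>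
      (pvUF N i, pvDF N i, pvGL N (i / N) (i % N), pvGR N (i / N) (i % N))) := by
  unfold build_square_torus_neighbors_alt
  rw [if_neg (by exact_mod_cast Nat.not_le.2 hN : ¬ ((N : Nat) : Int) ≤ 0)]
  simp only []
  rw [show ((N : Int) * (N : Int)) = ((N * N : Nat) : Int) by push_cast; ring]
  have hNM : N ≤ N * N := by
    calc N = 1 * N := (one_mul N).symm
    _ ≤ N * N := Nat.mul_le_mul_right N hN
  have hlen : (PySem.List.pyRange 0 ((N * N : Nat) : Int) 1).length = N * N := by
    rw [PySem.List.length_pyRange_one]; omega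
  rw [PySem.List.slice_from_neg_natCast _ N hN, PySem.List.slice_to_neg_natCast _ N hN, hlen]
  rw [PySem.List.slice_from_natCast, PySem.List.slice_to_natCast]
  rw [pvDrop_pyRange 0 (N * N - N) ((N * N : Nat) : Int) (by push_cast; omega), zero_add]
  rw [pvTake_pyRange 0 (N * N - N) ((N * N : Nat) : Int) (by push_cast; omega), zero_add]
  rw [pvDrop_pyRange 0 N ((N * N : Nat) : Int) (by push_cast; omega), zero_add]
  rw [pvTake_pyRange 0 N ((N * N : Nat) : Int) (by push_cast; omega), zero_add]
  rw [pvUp_eq N hN, pvDown_eq N hN]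
  rw [show PySem.List.pyRange 0 ((N : Nat) : Int) 1 =
        List.map (fun k : Nat => ((k : Nat) : Int)) (List.range N) from PySem.List.pyRange_zero_nat N]
  simp only [List.flatMap_map]
  have hL : ∀ k ∈ List.range N,
      (PySem.List.slice (PySem.List.slice (PySem.List.pyRange 0 ((N * N : Nat) : Int) 1)
          (some ((k : Int) * (N : Int))) (some (((k : Int) + 1) * (N : Int)))) (some (-1)) none ++
       PySem.List.slice (PySem.List.slice (PySem.List.pyRange 0 ((N * N : Nat) : Int) 1)
          (some ((k : Int) * (N : Int))) (some (((k : Int) + 1) * (N : Int)))) none (some (-1))) =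
      (List.range N).map (pvGL N k) := by
    intro k hk
    rw [pvRow_eq N k (List.mem_range.1 hk), pvRotL_eq N k hN]
  have hR : ∀ k ∈ List.range N,
      (PySem.List.slice (PySem.List.slice (PySem.List.pyRange 0 ((N * N : Nat) : Int) 1)
          (some ((k : Int) * (N : Int))) (some (((k : Int) + 1) * (N : Int)))) (some 1) none ++
       PySem.List.slice (PySem.List.slice (PySem.List.pyRange 0 ((N * N : Nat) : Int) 1)
          (some ((k : Int) * (N : Int))) (some (((k : Int) + 1) * (N : Int)))) none (some 1)) =
      (List.range N).map (pvGR N k) := by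
    intro k hk
    rw [pvRow_eq N k (List.mem_range.1 hk), pvRotR_eq N k hN]
  rw [List.flatMap_congr hL, List.flatMap_congr hR,
      pvFlatMap_range_map (pvGL N) N hN, pvFlatMap_range_map (pvGR N) N hN, pvZip4_map]

-- ===== VERDICT =====
theorem build_square_torus_neighbors_spec : Claim_equal_build_square_torus_neighbors := by
  intro n _
  unfold Spec_build_square_torus_neighbors
  rcases (by omega : n ≤ 0 ∨ 0 < n) with hn | hn
  · -- n ≤ 0: both sides are []
    unfold build_square_torus_neighbors build_square_torus_neighbors_alt
    rw [PySem.List.pyRange_one_eq_nil hn, if_pos hn]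
    rfl
  · obtain ⟨N, rfl⟩ : ∃ N : Nat, n = (N : Int) := ⟨n.toNat, (Int.toNat_of_nonneg hn.le).symm⟩
    have hN : 0 < N := by exact_mod_cast hn
    rw [pvA_eq N hN, pvB_eq N hN]
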